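-- pv_equiv track=rewrite | github.com/ishaangupta-YB/minivecdb | tests/benchmark.py | generate_metadata
-- ===== SOURCE A (Python) =====
-- from typing import Any, Dict, List, Optional, Tuple
--
-- def generate_metadata(n: int) -> List[Dict[str, Any]]:
--     """Generate metadata dicts for synthetic documents."""
--     categories = ["technology", "science", "sports", "health", "business"]
--     subcategories = {
--         "technology": ["ai", "programming", "gadgets", "software"],
--         "science": ["physics", "biology", "chemistry", "astronomy"],
--         "sports": ["football", "basketball", "cricket", "tennis"],
--         "health": ["nutrition", "fitness", "mental_health", "medicine"],
--         "business": ["startups", "finance", "marketing", "economy"],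
--     }
--     metadata_list: List[Dict[str, Any]] = []
--     for i in range(n):
--         cat = categories[i % len(categories)]
--         sub = subcategories[cat][i % len(subcategories[cat])]
--         metadata_list.append(
--             {
--                 "category": cat,
--                 "subcategory": sub,
--                 "source": "benchmark_synthetic",
--             }
--         )
--     return metadata_list
-- ===== SOURCE B (Python) =====
-- from typing import Any, Dict, List
--
-- # The (category, subcategory) pair depends on i only through i % 5 and i % 4, so it is
-- # periodic with period lcm(5, 4) = 20; the whole pattern is this fixed 20-entry table.
-- _PERIOD = [
--     ("technology", "ai"), ("science", "biology"), ("sports", "cricket"),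
--     ("health", "medicine"), ("business", "startups"), ("technology", "programming"),
--     ("science", "chemistry"), ("sports", "tennis"), ("health", "nutrition"),
--     ("business", "finance"), ("technology", "gadgets"), ("science", "astronomy"),
--     ("sports", "football"), ("health", "fitness"), ("business", "marketing"),
--     ("technology", "software"), ("science", "physics"), ("sports", "basketball"),
--     ("health", "mental_health"), ("business", "economy"),
-- ]
--
--
-- def generate_metadata(n: int) -> List[Dict[str, Any]]:
--     """Generate metadata dicts for synthetic documents."""
--     m = max(n, 0)
--     reps = -(-m // 20)  # ceiling division: enough tiled copies of the period
--     tiled = (_PERIOD * reps)[:m]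
--     return [
--         {"category": cat, "subcategory": sub, "source": "benchmark_synthetic"}
--         for cat, sub in tiled
--     ]
-- ===== Notes on version B (the rewrite author's own statement) =====
-- stated objective: alternative
-- what changed: B drops A's category/subcategory tables and modular lookups entirely: the (category, subcategory) pair is periodic in the index with period lcm(5,4)=20, so B stores the full 20-pair period as a literal table and builds the result by tiling it (ceil(n/20) copies truncated to n) and mapping each pair to its dict.
import Mathlib
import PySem

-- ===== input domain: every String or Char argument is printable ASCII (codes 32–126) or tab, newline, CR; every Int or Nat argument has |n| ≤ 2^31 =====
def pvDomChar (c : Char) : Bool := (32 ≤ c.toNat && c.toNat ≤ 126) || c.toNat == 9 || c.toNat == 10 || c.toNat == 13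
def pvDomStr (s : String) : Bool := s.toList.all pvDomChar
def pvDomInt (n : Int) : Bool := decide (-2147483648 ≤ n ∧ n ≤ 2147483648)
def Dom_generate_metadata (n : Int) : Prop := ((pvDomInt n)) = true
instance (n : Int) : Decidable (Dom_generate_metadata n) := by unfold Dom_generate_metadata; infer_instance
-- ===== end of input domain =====

-- B replaces A's per-index modular table lookups by a literal 20-entry period table tiled ceil(n/20) times and truncated (alternative decomposition, same values).


-- ===== PORT A =====
def catsA : List String := ["technology", "science", "sports", "health", "business"]

def subsA : PySem.Dict String (List String) :=
  ⟨[("technology", ["ai", "programming", "gadgets", "software"]),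
    ("science", ["physics", "biology", "chemistry", "astronomy"]),
    ("sports", ["football", "basketball", "cricket", "tennis"]),
    ("health", ["nutrition", "fitness", "mental_health", "medicine"]),
    ("business", ["startups", "finance", "marketing", "economy"])]⟩

-- categories[i % len(categories)] and subcategories[cat][i % len(...)]: the indices are in range 0..len-1, so pyGetD with a dummy default is exact
def metaEntryA (i : Int) : List (String × String) :=
  let cat := PySem.List.pyGetD catsA (PySem.Int.mod i (catsA.length : Int)) ""
  let subl := PySem.Dict.getD subsA cat []
  let sub := PySem.List.pyGetD subl (PySem.Int.mod i (subl.length : Int)) ""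
  [("category", cat), ("subcategory", sub), ("source", "benchmark_synthetic")]

def generate_metadata (n : Int) : List (List (String × String)) :=
  (PySem.List.pyRange 0 n 1).foldl (fun acc i => acc ++ [metaEntryA i]) []

-- ===== PORT B =====
-- Source B's literal period table _PERIOD (the pattern repeats every lcm(5,4) = 20 indices)
def periodB : List (String × String) :=
  [("technology", "ai"), ("science", "biology"), ("sports", "cricket"),
   ("health", "medicine"), ("business", "startups"), ("technology", "programming"),
   ("science", "chemistry"), ("sports", "tennis"), ("health", "nutrition"),
   ("business", "finance"), ("technology", "gadgets"), ("science", "astronomy"),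
   ("sports", "football"), ("health", "fitness"), ("business", "marketing"),
   ("technology", "software"), ("science", "physics"), ("sports", "basketball"),
   ("health", "mental_health"), ("business", "economy")]

-- Python's `lst * reps` (reps ≥ 0 here) is `reps` concatenated copies; the `[:m]` slice is PySem.List.slice
def generate_metadata_alt (n : Int) : List (List (String × String)) :=
  let m := max n 0
  let reps := -(PySem.Int.floordiv (-m) 20)
  let tiled := PySem.List.slice ((List.replicate reps.toNat periodB).flatten) none (some m)
  tiled.map (fun p => [("category", p.1), ("subcategory", p.2), ("source", "benchmark_synthetic")])

-- ===== PRECONDITION & SPEC =====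
def Spec_generate_metadata (n : Int) (out : List (List (String × String))) : Prop := out = generate_metadata_alt n
instance (n : Int) (out : List (List (String × String))) : Decidable (Spec_generate_metadata n out) := by unfold Spec_generate_metadata; infer_instance

-- ===== CLAIM (what is proved, stated in full; the proofs are below) =====
def Claim_equal_generate_metadata : Prop := ∀ (n : Int), Dom_generate_metadata n → Spec_generate_metadata n (generate_metadata n)

-- ===== LEMMAS AND PROOFS =====

-- A's per-index entry, as a function of the Nat loop counter (proof-side helper)
def ent (k : Nat) : List (String × String) := metaEntryA ((k : Nat) : Int)

-- B's pair-to-dict map (proof-side helper)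
def mkB (p : String × String) : List (String × String) :=
  [("category", p.1), ("subcategory", p.2), ("source", "benchmark_synthetic")]

-- A's entry depends on the index only through its residue mod 20 (since 5 ∣ 20 and 4 ∣ 20)
lemma ent_mod (k : Nat) : ent k = ent (k % 20) := by
  have h20 : k % 20 % 5 = k % 5 := Nat.mod_mod_of_dvd k (by norm_num)
  have h5 : k % 5 < 5 := Nat.mod_lt _ (by norm_num)
  unfold ent metaEntryA
  rw [show (catsA.length : Int) = ((5 : Nat) : Int) from rfl]
  rw [PySem.Int.mod_natCast, PySem.Int.mod_natCast, h20, PySem.List.pyGetD_natCast]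
  set t := k % 5 with ht
  interval_cases t <;>
    simp [catsA, subsA, PySem.Dict.getD, PySem.Dict.get?]

-- A as a map over List.range
lemma A_eq_map (n : Int) :
    generate_metadata n = (List.range n.toNat).map ent := by
  unfold generate_metadata
  rw [PySem.List.foldl_append_singleton_eq_map metaEntryA, PySem.List.pyRange_one,
      List.map_map]
  simp [ent]

-- B's period table, mapped to dicts, is exactly A's first 20 entries
lemma period_eq : periodB.map mkB = (List.range 20).map ent := by decide

-- truncated tiling of a 20-element block is the range-map of the 20-periodic function
lemma tiling {α : Type} (f : Nat → α) (reps m : Nat) (h : m ≤ 20 * reps) :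
    ((List.replicate reps ((List.range 20).map f)).flatten).take m =
      (List.range m).map (fun k => f (k % 20)) := by
  induction reps generalizing m with
  | zero =>
      have : m = 0 := by omega
      simp [this]
  | succ reps ih =>
      rw [List.replicate_succ, List.flatten_cons]
      by_cases hm : m ≤ 20
      · rw [List.take_append_of_le_length (by simp [hm])]
        rw [← List.map_take, List.take_range, Nat.min_eq_left hm]
        exact (List.map_congr_left fun k hk =>
          congrArg f (Nat.mod_eq_of_lt (lt_of_lt_of_le (List.mem_range.mp hk) hm))).symm
      · rw [Nat.not_le] at hm
        rw [List.take_append, List.take_of_length_le (by simp [hm.le]),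
            show ((List.range 20).map f).length = 20 by simp,
            ih (m - 20) (by omega)]
        have hr : (List.range m).map (fun k => f (k % 20)) =
            (List.range 20).map f ++ (List.range (m - 20)).map (fun k => f (k % 20)) := by
          conv_lhs => rw [show m = 20 + (m - 20) by omega]
          rw [List.range_add, List.map_append, List.map_map]
          congr 1
          all_goals
            exact List.map_congr_left fun k hk =>
              congrArg f (by beta_reduce; have := List.mem_range.mp hk; omega)
        rw [hr]

-- B's definition with the lets unfolded (definable by rfl; proof-side helper)
lemma B_def (n : Int) :
    generate_metadata_alt n =
      (PySem.List.slice ((List.replicate (-(PySem.Int.floordiv (-(max n 0)) 20)).toNat periodB).flatten)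
          none (some (max n 0))).map
        (fun p => [("category", p.1), ("subcategory", p.2), ("source", "benchmark_synthetic")]) := rfl

-- ===== VERDICT (by name: the statement is the Claim_ definition above) =====
theorem generate_metadata_spec : Claim_equal_generate_metadata := by
  intro n _
  show generate_metadata n = generate_metadata_alt n
  rw [A_eq_map n, B_def n]
  set m : Int := max n 0 with hm
  have hm0 : 0 ≤ m := le_max_right _ _
  set q : Int := -(PySem.Int.floordiv (-m) 20) with hq
  have hbounds : (q - 1) * 20 < m ∧ m ≤ q * 20 :=
    (PySem.Int.neg_floordiv_neg_eq_iff_of_pos (by norm_num)).mp hq.symm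
  have hmn : m.toNat = n.toNat := by omega
  have hle : m.toNat ≤ 20 * q.toNat := by omega
  rw [PySem.List.slice_to _ hm0]
  symm
  calc ((List.replicate q.toNat periodB).flatten.take m.toNat).map
        (fun p => [("category", p.1), ("subcategory", p.2), ("source", "benchmark_synthetic")])
      = ((List.replicate q.toNat periodB).flatten.map mkB).take m.toNat := by
        rw [← List.map_take]; rfl
    _ = ((List.replicate q.toNat (periodB.map mkB)).flatten).take m.toNat := by
        rw [List.map_flatten, List.map_replicate]
    _ = (List.range m.toNat).map (fun k => ent (k % 20)) := by
        rw [period_eq, tiling ent q.toNat m.toNat hle]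
    _ = (List.range n.toNat).map ent := by
        rw [hmn]; exact (List.map_congr_left fun k _ => (ent_mod k).symm)
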